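-- pv_equiv track=rewrite | github.com/huid857/wanzheng- | feature_extractor.py | _rounds_since_switch
-- ===== SOURCE A (Python) =====
-- def _rounds_since_switch(data):
--     """距离上次转换的局数"""
--     if len(data) < 2:
--         return 0
--
--     rounds = 0
--     for i in range(len(data) - 1, 0, -1):
--         if data[i] == data[i-1]:
--             rounds += 1
--         else:
--             break
--
--     return rounds
-- ===== SOURCE B (Python) =====
-- def _rounds_since_switch(data):
--     """距离上次转换的局数"""
--     if len(data) < 2:
--         return 0
--     prev = data[0]
--     run = 1
--     for x in data[1:]:
--         run = run + 1 if x == prev else 1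
--         prev = x
--     return run - 1
-- ===== Notes on version B (the rewrite author's own statement) =====
-- stated objective: alternative
-- what changed: Replaces the backward index-based early-breaking scan over range(len-1,0,-1) with a forward single pass that maintains the current run length (resetting on a value change) and returns the final run length minus one.
import Mathlib
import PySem

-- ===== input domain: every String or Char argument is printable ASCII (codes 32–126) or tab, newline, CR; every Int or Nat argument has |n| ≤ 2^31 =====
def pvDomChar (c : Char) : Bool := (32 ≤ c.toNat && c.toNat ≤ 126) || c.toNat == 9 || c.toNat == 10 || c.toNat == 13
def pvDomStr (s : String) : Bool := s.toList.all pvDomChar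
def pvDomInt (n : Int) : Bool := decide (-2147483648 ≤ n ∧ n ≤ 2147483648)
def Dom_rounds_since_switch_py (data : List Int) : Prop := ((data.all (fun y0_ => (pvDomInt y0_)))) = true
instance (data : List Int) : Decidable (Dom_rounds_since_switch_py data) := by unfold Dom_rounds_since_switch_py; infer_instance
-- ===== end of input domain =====

-- ===== PORT A =====
-- for i in range(len(data)-1, 0, -1): break on first unequal neighbour pair
def aLoopA (data : List Int) : List Int → Int → Int
  | [], r => r
  | i :: rest, r =>
    if PySem.List.pyGet? data i = PySem.List.pyGet? data (i - 1) then
      aLoopA data rest (r + 1)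
    else r

def rounds_since_switch_py (data : List Int) : Int :=
  if (data.length : Int) < 2 then 0
  else aLoopA data (PySem.List.pyRange ((data.length : Int) - 1) 0 (-1)) 0

-- ===== PORT B =====
-- forward pass over data[1:], maintaining (prev, run); returns final run length
def bRun : List Int → Int → Int → Int
  | [], _, run => run
  | x :: xs, prev, run =>
    if x = prev then bRun xs x (run + 1) else bRun xs x 1

def rounds_since_switch_py_alt (data : List Int) : Int :=
  if (data.length : Int) < 2 then 0
  else
    match data with
    | [] => 0
    | x :: xs => bRun xs x 1 - 1

-- ===== PRECONDITION & SPEC =====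
def Spec_rounds_since_switch_py (data : List Int) (out : Int) : Prop := out = rounds_since_switch_py_alt data
instance (data : List Int) (out : Int) : Decidable (Spec_rounds_since_switch_py data out) := by unfold Spec_rounds_since_switch_py; infer_instance

-- ===== CLAIM (what is proved, stated in full; the proofs are below) =====
def Claim_equal_rounds_since_switch_py : Prop := ∀ (data : List Int), Dom_rounds_since_switch_py data → Spec_rounds_since_switch_py data (rounds_since_switch_py data)

-- ===== LEMMAS AND PROOFS =====

theorem aLoopA_acc (data : List Int) (idxs : List Int) (r : Int) :
    aLoopA data idxs r = r + aLoopA data idxs 0 := by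
  induction idxs generalizing r with
  | nil => simp [aLoopA]
  | cons i rest ih =>
    simp only [aLoopA]
    split_ifs
    · rw [ih (r + 1), ih (0 + 1)]; ring
    · ring

theorem aLoopA_prefix (l t : List Int) (idxs : List Int)
    (h : ∀ i ∈ idxs, 1 ≤ i ∧ i < (l.length : Int)) (r : Int) :
    aLoopA (l ++ t) idxs r = aLoopA l idxs r := by
  induction idxs generalizing r with
  | nil => rfl
  | cons i rest ih =>
    obtain ⟨h1, h2⟩ := h i (List.mem_cons_self ..)
    have hi : i = ((i.toNat : Nat) : Int) := by omega
    have hi1 : i - 1 = ((i.toNat - 1 : Nat) : Int) := by omega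
    have e1 : PySem.List.pyGet? (l ++ t) i = PySem.List.pyGet? l i := by
      rw [hi, PySem.List.pyGet?_natCast, PySem.List.pyGet?_natCast,
        List.getElem?_append_left (by omega)]
    have e2 : PySem.List.pyGet? (l ++ t) (i - 1) = PySem.List.pyGet? l (i - 1) := by
      rw [hi1, PySem.List.pyGet?_natCast, PySem.List.pyGet?_natCast,
        List.getElem?_append_left (by omega)]
    simp only [aLoopA, e1, e2]
    split_ifs
    · exact ih (fun j hj => h j (List.mem_cons_of_mem _ hj)) (r + 1)
    · rfl

theorem a_alt_form (l : List Int) :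
    aLoopA l (PySem.List.pyRange ((l.length : Int) - 1) 0 (-1)) 0 = rounds_since_switch_py l := by
  unfold rounds_since_switch_py
  split_ifs with h
  · rw [PySem.List.pyRange_neg_one_eq_nil (by omega)]; rfl
  · rfl

theorem a_concat2 (m : List Int) (b a : Int) :
    rounds_since_switch_py (m ++ [b, a]) =
      if a = b then rounds_since_switch_py (m ++ [b]) + 1 else 0 := by
  have hL : ((m ++ [b, a]).length : Int) = (m.length : Int) + 2 := by simp
  have hstep : rounds_since_switch_py (m ++ [b, a]) =
      aLoopA (m ++ [b, a]) (PySem.List.pyRange ((m.length : Int) + 1) 0 (-1)) 0 := by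
    unfold rounds_since_switch_py
    rw [hL, if_neg (by omega)]
    have h21 : (m.length : Int) + 2 - 1 = (m.length : Int) + 1 := by ring
    rw [h21]
  rw [hstep, PySem.List.pyRange_neg_one_cons (by positivity)]
  simp only [aLoopA]
  have h11 : (m.length : Int) + 1 - 1 = (m.length : Int) := by ring
  rw [h11]
  have e1 : PySem.List.pyGet? (m ++ [b, a]) ((m.length : Int) + 1) = some a := by
    have h' : (m.length : Int) + 1 = ((m.length + 1 : Nat) : Int) := by push_cast; ring
    rw [h', PySem.List.pyGet?_natCast]
    simp
  have e2 : PySem.List.pyGet? (m ++ [b, a]) ((m.length : Nat) : Int) = some b := by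
    rw [PySem.List.pyGet?_natCast]
    simp
  rw [e1, e2]
  simp only [Option.some_inj]
  have hrange : ∀ i ∈ PySem.List.pyRange ((m.length : Nat) : Int) 0 (-1),
      1 ≤ i ∧ i < ((m ++ [b]).length : Int) := by
    intro i hi
    rw [PySem.List.mem_pyRange_neg_one] at hi
    simp only [List.length_append, List.length_cons, List.length_nil]
    push_cast
    omega
  have hpre : aLoopA (m ++ [b, a]) (PySem.List.pyRange ((m.length : Nat) : Int) 0 (-1)) 0
      = rounds_since_switch_py (m ++ [b]) := by
    have hsplit : m ++ [b, a] = (m ++ [b]) ++ [a] := by simp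
    rw [hsplit, aLoopA_prefix (m ++ [b]) [a] _ hrange]
    have hl : ((m ++ [b]).length : Int) - 1 = ((m.length : Nat) : Int) := by
      simp only [List.length_append, List.length_cons, List.length_nil]
      push_cast
      ring
    rw [← hl, a_alt_form]
  by_cases hab : a = b
  · rw [if_pos hab, if_pos hab, aLoopA_acc, hpre]; ring
  · rw [if_neg hab, if_neg hab]

theorem bRun_concat (xs : List Int) (prev run a : Int) :
    bRun (xs ++ [a]) prev run =
      if xs.getLastD prev = a then bRun xs prev run + 1 else 1 := by
  induction xs generalizing prev run with
  | nil =>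
    simp only [List.nil_append, bRun, List.getLastD_nil]
    by_cases h : a = prev
    · subst h; simp
    · rw [if_neg h, if_neg (fun h' => h h'.symm)]
  | cons y ys ih =>
    simp only [List.cons_append, bRun, List.getLastD_cons]
    split_ifs with h1 h2 h3 <;> simp_all

theorem alt_cons (x : Int) (xs : List Int) :
    rounds_since_switch_py_alt (x :: xs) = bRun xs x 1 - 1 := by
  unfold rounds_since_switch_py_alt
  split_ifs with h
  · have : xs = [] := by
      cases xs with
      | nil => rfl
      | cons y ys => simp at h; omega
    subst this; rfl
  · rfl

theorem main_eq (data : List Int) :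
    rounds_since_switch_py data = rounds_since_switch_py_alt data := by
  induction data using List.reverseRecOn with
  | nil => rfl
  | append_singleton l a ih =>
    rcases List.eq_nil_or_concat l with rfl | ⟨m, b, rfl⟩
    · rfl
    · rw [List.concat_eq_append] at ih ⊢
      obtain ⟨x, xs, hx⟩ : ∃ x xs, m ++ [b] = x :: xs := by
        cases m with
        | nil => exact ⟨b, [], rfl⟩
        | cons y ys => exact ⟨y, ys ++ [b], rfl⟩
      have hA : rounds_since_switch_py (m ++ [b] ++ [a]) =
          if a = b then rounds_since_switch_py (m ++ [b]) + 1 else 0 := by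
        rw [List.append_assoc]
        exact a_concat2 m b a
      have hlast : xs.getLastD x = b := by
        have : (x :: xs).getLastD 0 = b := by rw [← hx, List.getLastD_concat]
        rwa [List.getLastD_cons] at this
      have hB : rounds_since_switch_py_alt (m ++ [b] ++ [a]) =
          if a = b then rounds_since_switch_py_alt (m ++ [b]) + 1 else 0 := by
        rw [hx, List.cons_append, alt_cons, bRun_concat, hlast, alt_cons]
        by_cases hab : a = b
        · subst hab; simp
        · rw [if_neg (fun h' => hab h'.symm), if_neg hab]; norm_num
      rw [hA, hB, ih]

-- ===== VERDICT (by name: the statement is the Claim_ definition above) =====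
theorem rounds_since_switch_py_spec : Claim_equal_rounds_since_switch_py := by
  intro data _
  unfold Spec_rounds_since_switch_py
  exact main_eq data
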